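-- pv_equiv track=rewrite | github.com/CyriaqueCCN/404CTF | reverse/renv_tour_1/solve.py | rev3
-- ===== SOURCE A (Python) =====
-- def rev3(pwd):
--     # in  : str[34]
--     # out : list[34]
--     p = list(pwd)
--     new = [0] * 34
--     lp = len(p)
--     for i in range(lp):
--         new[i] = ord(p[lp - 1 - i]) - i % 4
--         new[lp - 1 - i] = ord(p[i]) - i % 4
--     return new
-- ===== SOURCE B (Python) =====
-- def rev3(pwd):
--     # Each slot j is last written at iteration max(j, lp-1-j), always with the
--     # reversed character; compute the net value once per slot, no overwrites.
--     lp = len(pwd)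
--     head = [ord(pwd[lp - 1 - j]) - max(j, lp - 1 - j) % 4 for j in range(lp)]
--     return head + [0] * (34 - lp)
-- ===== Notes on version B (the rewrite author's own statement) =====
-- stated objective: simpler
-- what changed: B replaces A's double-write loop (each slot written twice, later iteration winning) by a single comprehension computing each slot's net value in closed form, appending the zero tail.
import Mathlib
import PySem

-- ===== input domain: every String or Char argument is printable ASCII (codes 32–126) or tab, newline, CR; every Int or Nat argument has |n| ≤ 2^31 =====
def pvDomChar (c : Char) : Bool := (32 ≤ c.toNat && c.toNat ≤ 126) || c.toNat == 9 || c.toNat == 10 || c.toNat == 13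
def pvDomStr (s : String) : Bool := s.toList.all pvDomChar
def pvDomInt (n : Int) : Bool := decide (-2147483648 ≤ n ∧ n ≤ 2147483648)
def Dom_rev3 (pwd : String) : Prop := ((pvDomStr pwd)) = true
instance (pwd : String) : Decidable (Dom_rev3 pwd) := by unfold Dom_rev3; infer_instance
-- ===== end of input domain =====

-- B computes each output slot once in closed form (the later of the two writes A makes
-- to a slot wins, always with the reversed character), instead of A's double-write loop.


-- ===== PORT A =====
-- loop body of A: new[i] = ord(p[lp-1-i]) - i%4; new[lp-1-i] = ord(p[i]) - i%4
-- (indices are in range under Pre_rev3, so List.set is exact for Python's list assignment)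
def stepA (p : List Char) (lp : Nat) (new : List Int) (i : Nat) : List Int :=
  (new.set i ((p[lp - 1 - i]!.toNat : Int) - ((i % 4 : Nat) : Int))).set (lp - 1 - i)
    ((p[i]!.toNat : Int) - ((i % 4 : Nat) : Int))

def rev3 (pwd : String) : List Int :=
  let p := pwd.toList
  let lp := p.length
  (List.range lp).foldl (stepA p lp) (List.replicate 34 (0 : Int))

-- ===== PORT B =====
def rev3_alt (pwd : String) : List Int :=
  let p := pwd.toList
  let lp := p.length
  ((List.range lp).map (fun j =>
      (p[lp - 1 - j]!.toNat : Int) - (((max j (lp - 1 - j)) % 4 : Nat) : Int)))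
    ++ List.replicate (34 - lp) (0 : Int)

-- ===== PRECONDITION & SPEC =====
-- Pre_ excludes exactly the strings longer than 34 characters, on which A raises IndexError.
def Pre_rev3 (pwd : String) : Prop := pwd.toList.length ≤ 34
instance (pwd : String) : Decidable (Pre_rev3 pwd) := by unfold Pre_rev3; infer_instance
def pvWitness_rev3 : String := "abc"

def Spec_rev3 (pwd : String) (out : List Int) : Prop := out = rev3_alt pwd
instance (pwd : String) (out : List Int) : Decidable (Spec_rev3 pwd out) := by unfold Spec_rev3; infer_instance

-- ===== CLAIM (what is proved, stated in full; the proofs are below) =====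
def Claim_equal_rev3 : Prop := ∀ (pwd : String), Dom_rev3 pwd → Pre_rev3 pwd → Spec_rev3 pwd (rev3 pwd)

-- ===== LEMMAS AND PROOFS =====

-- value of slot j after the first n iterations of A's loop
def gval (p : List Char) (lp n j : Nat) : Int :=
  if j < lp then
    if max j (lp - 1 - j) < n then
      (p[lp - 1 - j]!.toNat : Int) - (((max j (lp - 1 - j)) % 4 : Nat) : Int)
    else if min j (lp - 1 - j) < n then
      (p[lp - 1 - j]!.toNat : Int) - (((min j (lp - 1 - j)) % 4 : Nat) : Int)
    else 0
  else 0

lemma gval_zero (p : List Char) (lp : Nat) :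
    (List.range 34).map (gval p lp 0) = List.replicate 34 (0 : Int) := by
  apply List.ext_getElem
  · simp
  · intro j h1 h2
    simp only [List.getElem_map, List.getElem_range, List.getElem_replicate]
    simp [gval]

lemma step_eq (p : List Char) (lp n : Nat) (hn : n < lp) (hlp : lp ≤ 34) :
    stepA p lp ((List.range 34).map (gval p lp n)) n = (List.range 34).map (gval p lp (n + 1)) := by
  apply List.ext_getElem
  · simp [stepA]
  · intro j h1 h2
    simp only [stepA, List.getElem_set, List.getElem_map, List.getElem_range] at *
    by_cases hj2 : lp - 1 - n = j
    · -- slot lp-1-n written by the second statement of iteration n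
      subst hj2
      have hidx : lp - 1 - (lp - 1 - n) = n := by omega
      simp only [gval, hidx]
      have : min (lp - 1 - n) n < n + 1 := by omega
      rcases Nat.lt_or_ge (max (lp - 1 - n) n) (n + 1) with h | h
      · have hmax : max (lp - 1 - n) n = n := by omega
        simp [hmax, show lp - 1 - n < lp by omega]
      · have hmin : min (lp - 1 - n) n = n := by omega
        simp [hmin, show ¬ max (lp - 1 - n) n < n + 1 by omega,
          show lp - 1 - n < lp by omega]
    · rw [if_neg hj2]
      by_cases hj1 : n = j
      · -- slot n written by the first statement of iteration n
        subst hj1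
        simp only [gval, if_pos hn]
        rcases Nat.lt_or_ge (max n (lp - 1 - n)) (n + 1) with h | h
        · have hmax : max n (lp - 1 - n) = n := by omega
          simp [hmax]
        · have hmin : min n (lp - 1 - n) = n := by omega
          simp [hmin, show ¬ max n (lp - 1 - n) < n + 1 by omega]
      · -- untouched slot: the winning iteration is unchanged
        rw [if_neg hj1]
        unfold gval
        by_cases hjl : j < lp
        · have hne : lp - 1 - j ≠ n := by omega
          have h1 : max j (lp - 1 - j) < n ↔ max j (lp - 1 - j) < n + 1 := by omega
          have h2 : min j (lp - 1 - j) < n ↔ min j (lp - 1 - j) < n + 1 := by omega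
          simp only [hjl, if_pos]
          split_ifs with a b c d <;> first | rfl | omega
        · simp [hjl]

lemma inv (p : List Char) (lp : Nat) (hlp : lp ≤ 34) :
    ∀ n, n ≤ lp →
      (List.range n).foldl (stepA p lp) (List.replicate 34 (0 : Int)) =
        (List.range 34).map (gval p lp n) := by
  intro n
  induction n with
  | zero => intro _; simp [gval_zero]
  | succ n ih =>
    intro h
    rw [List.range_succ, List.foldl_append, ih (by omega), List.foldl_cons, List.foldl_nil,
      step_eq p lp n (by omega) hlp]

lemma final_eq (p : List Char) (lp : Nat) (hlp : lp ≤ 34) :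
    (List.range 34).map (gval p lp lp) =
      ((List.range lp).map (fun j =>
          (p[lp - 1 - j]!.toNat : Int) - (((max j (lp - 1 - j)) % 4 : Nat) : Int)))
        ++ List.replicate (34 - lp) (0 : Int) := by
  apply List.ext_getElem
  · simp; omega
  · intro j h1 h2
    simp only [List.getElem_map, List.getElem_range] at *
    rw [List.getElem_append]
    by_cases hj : j < lp
    · simp only [List.length_map, List.length_range]
      rw [dif_pos hj]
      simp only [List.getElem_map, List.getElem_range]
      unfold gval
      rw [if_pos hj, if_pos (by omega)]
    · simp only [List.length_map, List.length_range]
      rw [dif_neg hj]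
      simp only [List.getElem_replicate]
      unfold gval
      rw [if_neg hj]

-- ===== VERDICT (by name: the statement is the Claim_ definition above) =====
theorem rev3_spec : Claim_equal_rev3 := by
  intro pwd _ hpre
  unfold Spec_rev3 rev3 rev3_alt
  have hlp : pwd.toList.length ≤ 34 := hpre
  rw [inv pwd.toList pwd.toList.length hlp pwd.toList.length le_rfl,
    final_eq pwd.toList pwd.toList.length hlp]
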